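-- pv_equiv track=rewrite | github.com/PatriciaSalas/sistema-gestion-kiosko-python | validaciones.py | formatear_rut
-- ===== SOURCE A (Python) =====
-- def formatear_rut(rut):
--     """
--     Limpia y da formato a un RUT (ej: 12345678-9 -> 12.345.678-9).
--     """
--     rut_limpio = rut.upper().replace('.', '').replace('-', '').strip()
--
--     if len(rut_limpio) < 2:
--         return rut_limpio
--
--     dv = rut_limpio[-1]
--     cuerpo = rut_limpio[:-1]
--
--     # Lógica de formato
--     formato = ""
--     while cuerpo:
--         formato = cuerpo[-3:] + "." + formato
--         cuerpo = cuerpo[:-3]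
--
--     return (formato[:-1] + "-" + dv).lstrip('.')
-- ===== SOURCE B (Python) =====
-- def formatear_rut(rut):
--     """
--     Limpia y da formato a un RUT (ej: 12345678-9 -> 12.345.678-9).
--     """
--     rut_limpio = rut.upper().replace('.', '').replace('-', '').strip()
--
--     if len(rut_limpio) < 2:
--         return rut_limpio
--
--     dv = rut_limpio[-1]
--     cuerpo = rut_limpio[:-1]
--
--     # One pass over the reversed body: a '.' before every char whose index
--     # is a nonzero multiple of 3; reverse the accumulator at the end.
--     acc = []
--     for i, ch in enumerate(reversed(cuerpo)):
--         if i and i % 3 == 0: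
--             acc.append('.')
--         acc.append(ch)
--
--     return ''.join(reversed(acc)) + '-' + dv
-- ===== Notes on version B (the rewrite author's own statement) =====
-- stated objective: faster
-- what changed: The body is formatted in one pass over the reversed body with a modulo-3 counter deciding where dots go (no trailing-dot trim, no lstrip), instead of A's while-loop that re-slices and re-builds the remaining body string and the growing formato string for every 3-character group, which copies O(n) characters per group.
import Mathlib
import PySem

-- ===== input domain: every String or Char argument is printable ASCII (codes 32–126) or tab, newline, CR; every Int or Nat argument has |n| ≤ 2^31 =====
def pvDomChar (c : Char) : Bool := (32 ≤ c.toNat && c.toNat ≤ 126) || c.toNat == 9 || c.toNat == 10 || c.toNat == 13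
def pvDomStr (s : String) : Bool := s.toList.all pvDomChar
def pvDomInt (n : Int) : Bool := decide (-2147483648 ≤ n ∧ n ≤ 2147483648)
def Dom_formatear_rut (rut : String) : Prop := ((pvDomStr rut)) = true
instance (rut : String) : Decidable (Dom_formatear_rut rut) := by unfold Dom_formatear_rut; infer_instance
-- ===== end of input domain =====

-- B formats the RUT body in one pass over the reversed body with a modulo-3 counter,
-- instead of A's while-loop that re-slices the shrinking body and re-builds the growing
-- formato string per 3-char group (measured faster in a timing run).

-- ===== PORT A =====
-- the while-loop; it terminates because cuerpo[:-3] is strictly shorter: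
theorem pv_slice_to3_lt (l : List Char) (h : l ≠ []) :
    (PySem.List.slice l none (some (-3))).length < l.length := by
  simp only [PySem.List.slice, PySem.List.clampIdx]
  norm_num
  have hl : 0 < l.length := List.length_pos_iff.mpr h
  split_ifs with h3 <;> simp <;> omega

def formatear_rut_loop (cuerpo formato : List Char) : List Char :=
  if h : cuerpo = [] then formato
  else formatear_rut_loop (PySem.List.slice cuerpo none (some (-3)))
        (PySem.List.slice cuerpo (some (-3)) none ++ '.' :: formato)
termination_by cuerpo.length
decreasing_by exact pv_slice_to3_lt _ h

def formatear_rut (rut : String) : String :=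
  let rut_limpio :=
    PySem.Chars.strip (PySem.Chars.replace
      (PySem.Chars.replace (PySem.Chars.upper rut.toList) ['.'] []) ['-'] [])
  if rut_limpio.length < 2 then String.mk rut_limpio
  else
    let dv : List Char := match PySem.List.pyGet? rut_limpio (-1) with
      | some c => [c]
      | none => []
    let cuerpo := PySem.List.slice rut_limpio none (some (-1))
    let formato := formatear_rut_loop cuerpo []
    String.mk (List.dropWhile (fun c => c == '.')
      (PySem.List.slice formato none (some (-1)) ++ '-' :: dv))

-- ===== PORT B =====
-- for i, ch in enumerate(reversed(cuerpo)): if i and i % 3 == 0: acc.append('.'); acc.append(ch)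
def formatear_rut_alt_loop : List Char → Nat → List Char → List Char
  | [], _, acc => acc
  | c :: rest, i, acc =>
      formatear_rut_alt_loop rest (i + 1)
        ((if i ≠ 0 ∧ i % 3 = 0 then acc ++ ['.'] else acc) ++ [c])

def formatear_rut_alt (rut : String) : String :=
  let rut_limpio :=
    PySem.Chars.strip (PySem.Chars.replace
      (PySem.Chars.replace (PySem.Chars.upper rut.toList) ['.'] []) ['-'] [])
  if rut_limpio.length < 2 then String.mk rut_limpio
  else
    let dv : List Char := match PySem.List.pyGet? rut_limpio (-1) with
      | some c => [c]
      | none => []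
    let cuerpo := PySem.List.slice rut_limpio none (some (-1))
    let acc := formatear_rut_alt_loop cuerpo.reverse 0 []
    String.mk (acc.reverse ++ '-' :: dv)

-- ===== PRECONDITION & SPEC =====
def Spec_formatear_rut (rut : String) (out : String) : Prop := out = formatear_rut_alt rut
instance (rut : String) (out : String) : Decidable (Spec_formatear_rut rut out) := by unfold Spec_formatear_rut; infer_instance

-- ===== CLAIM (what is proved, stated in full; the proofs are below) =====
def Claim_equal_formatear_rut : Prop := ∀ (rut : String), Dom_formatear_rut rut → Spec_formatear_rut rut (formatear_rut rut)

-- ===== LEMMAS AND PROOFS =====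

-- the common specification both loops are reduced to: the dotted groups of the
-- REVERSED body (a dot before every later group of three)
def pvGroups (r : List Char) : List Char :=
  if h : r = [] then []
  else r.take 3 ++ (if r.drop 3 = [] then [] else ['.']) ++ pvGroups (r.drop 3)
termination_by r.length
decreasing_by
  have : 0 < r.length := List.length_pos_iff.mpr h
  simp
  omega

theorem pvGroups_nil : pvGroups [] = [] := by rw [pvGroups]; simp

-- the negative slices both ports use, as take/drop
theorem pv_slice_to3 (l : List Char) :
    PySem.List.slice l none (some (-3)) = l.take (l.length - 3) := by
  simp only [PySem.List.slice, PySem.List.clampIdx]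
  norm_num
  split_ifs with h
  · rw [Nat.sub_eq_zero_of_le (by omega : l.length ≤ 3)]; simp
  · congr 1; omega

theorem pv_slice_from3 (l : List Char) :
    PySem.List.slice l (some (-3)) none = l.drop (l.length - 3) := by
  simp only [PySem.List.slice, PySem.List.clampIdx]
  norm_num
  split_ifs with h
  · rw [Nat.sub_eq_zero_of_le (by omega : l.length ≤ 3)]; simp
  · rw [List.take_of_length_le (by simp)]
    congr 1; omega

theorem pv_slice_to1 (l : List Char) :
    PySem.List.slice l none (some (-1)) = l.take (l.length - 1) := by
  simp only [PySem.List.slice, PySem.List.clampIdx]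
  norm_num
  split_ifs with h
  · subst h; simp
  · simp; omega

-- A's loop: the accumulated formato is appended behind the groups of the rest
theorem pv_aloop_acc_aux (n : Nat) : ∀ (l f : List Char), l.length ≤ n →
    formatear_rut_loop l f = formatear_rut_loop l [] ++ f := by
  induction n with
  | zero =>
    intro l f h
    have : l = [] := List.eq_nil_of_length_eq_zero (Nat.le_zero.mp h)
    subst this; simp [formatear_rut_loop]
  | succ n ih =>
    intro l f h
    by_cases hl : l = []
    · simp [formatear_rut_loop, hl]
    · have hlt := pv_slice_to3_lt l hl
      have e : ∀ g, formatear_rut_loop l g = formatear_rut_loop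
          (PySem.List.slice l none (some (-3))) (PySem.List.slice l (some (-3)) none ++ '.' :: g) := by
        intro g; rw [formatear_rut_loop]; rw [dif_neg hl]
      rw [e f, e [], ih _ _ (by omega),
          ih _ (PySem.List.slice l (some (-3)) ++ ['.']) (by omega)]
      simp

theorem pv_aloop_acc (l f : List Char) :
    formatear_rut_loop l f = formatear_rut_loop l [] ++ f :=
  pv_aloop_acc_aux l.length l f le_rfl

-- A's loop yields the reversed groups of the reversed body plus a trailing dot
theorem pv_aloop_eq_groups_aux (n : Nat) : ∀ (l : List Char), l.length ≤ n → l ≠ [] →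
    formatear_rut_loop l [] = (pvGroups l.reverse).reverse ++ ['.'] := by
  induction n with
  | zero =>
    intro l h hl
    exact absurd (List.eq_nil_of_length_eq_zero (Nat.le_zero.mp h)) hl
  | succ n ih =>
    intro l h hl
    rw [formatear_rut_loop, dif_neg hl, pv_aloop_acc, pv_slice_to3, pv_slice_from3]
    by_cases hf : l.take (l.length - 3) = []
    · have h3 : l.length ≤ 3 := by
        rcases Nat.lt_or_ge l.length 4 with h4 | h4
        · omega
        · exfalso; have := congrArg List.length hf; simp at this; omega
      rw [hf, formatear_rut_loop, dif_pos rfl]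
      rw [Nat.sub_eq_zero_of_le h3, List.drop_zero]
      conv_rhs => rw [pvGroups]
      have : l.reverse.drop 3 = [] := by simp; omega
      simp [hl, this, pvGroups_nil, List.take_of_length_le (by simp; omega : l.reverse.length ≤ 3)]
    · have hlen : 0 < l.length := List.length_pos_iff.mpr hl
      have h4 : 3 < l.length := by
        by_contra hc
        exact hf (by rw [Nat.sub_eq_zero_of_le (by omega)]; simp)
      rw [ih _ (by simp; omega) hf]
      conv_rhs => rw [pvGroups]
      rw [List.take_reverse, List.drop_reverse]
      have h5 : ¬(l.length - 3 = 0) := by omega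
      simp [h5, hl]

-- B's loop: the accumulator is only ever appended to
theorem pv_bloop_acc (r : List Char) (i : Nat) (acc : List Char) :
    formatear_rut_alt_loop r i acc = acc ++ formatear_rut_alt_loop r i [] := by
  induction r generalizing i acc with
  | nil => simp [formatear_rut_alt_loop]
  | cons c rest ih =>
    rw [formatear_rut_alt_loop, formatear_rut_alt_loop,
        ih (i + 1), ih (i + 1) ((if i ≠ 0 ∧ i % 3 = 0 then ([] : List Char) ++ ['.'] else []) ++ [c])]
    split_ifs <;> simp

-- B's loop yields the groups of its argument (a leading dot only when i ≠ 0)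
theorem pv_bloop_eq_groups_aux (n : Nat) : ∀ (r : List Char) (i : Nat), r.length ≤ n → i % 3 = 0 →
    formatear_rut_alt_loop r i [] = (if i = 0 ∨ r = [] then [] else ['.']) ++ pvGroups r := by
  induction n with
  | zero =>
    intro r i h _
    have : r = [] := List.eq_nil_of_length_eq_zero (Nat.le_zero.mp h)
    subst this; simp [formatear_rut_alt_loop, pvGroups_nil]
  | succ n ih =>
    intro r i h hi
    have h1 : (i + 1) % 3 ≠ 0 := by omega
    have h2 : (i + 2) % 3 ≠ 0 := by omega
    match r with
    | [] => simp [formatear_rut_alt_loop, pvGroups_nil]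
    | [c] =>
      rw [formatear_rut_alt_loop, formatear_rut_alt_loop]
      conv_rhs => rw [pvGroups]
      rcases Nat.eq_zero_or_pos i with h0 | h0
      · simp [h0, pvGroups_nil]
      · simp [Nat.pos_iff_ne_zero.mp h0, hi, pvGroups_nil]
    | [c1, c2] =>
      rw [formatear_rut_alt_loop, formatear_rut_alt_loop, formatear_rut_alt_loop]
      conv_rhs => rw [pvGroups]
      rcases Nat.eq_zero_or_pos i with h0 | h0
      · simp [h0, pvGroups_nil]
      · simp [Nat.pos_iff_ne_zero.mp h0, hi, h1, pvGroups_nil]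
    | c1 :: c2 :: c3 :: t =>
      rw [formatear_rut_alt_loop, formatear_rut_alt_loop, formatear_rut_alt_loop,
          pv_bloop_acc, ih t (i + 3) (by simp at h ⊢; omega) (by omega)]
      conv_rhs => rw [pvGroups]
      rcases Nat.eq_zero_or_pos i with h0 | h0
      · simp [h0]
      · simp [Nat.pos_iff_ne_zero.mp h0, hi, h1, h2]

-- the last character of the grouped body is a character of the body (not a dot)
theorem pv_groups_getLast_aux (n : Nat) : ∀ (r : List Char), r.length ≤ n → r ≠ [] →
    ∃ c, (pvGroups r).getLast? = some c ∧ c ∈ r := by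
  induction n with
  | zero => intro r h hr; exact absurd (List.eq_nil_of_length_eq_zero (Nat.le_zero.mp h)) hr
  | succ n ih =>
    intro r h hr
    rw [pvGroups, dif_neg hr]
    by_cases hd : r.drop 3 = []
    · have h3 : r.length ≤ 3 := by
        have := congrArg List.length hd; simp at this; omega
      rw [hd, List.take_of_length_le h3]
      simp [pvGroups_nil]
      exact ⟨r.getLast hr, by simp [List.getLast?_eq_getLast_of_ne_nil hr], List.getLast_mem hr⟩
    · obtain ⟨c, hc1, hc2⟩ := ih (r.drop 3) (by simp at h ⊢; omega) hd
      refine ⟨c, ?_, List.mem_of_mem_drop hc2⟩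
      have hne : pvGroups (r.drop 3) ≠ [] := by
        intro hnil; rw [hnil] at hc1; simp at hc1
      rw [List.getLast?_append_of_ne_nil _ hne, hc1]

-- str.replace(old, '') only removes characters …
theorem pv_go_mem {c : Char} (old : List Char) : ∀ (fuel : Nat) (l acc : List Char),
    c ∈ PySem.Chars.replace.go old [] fuel l acc → c ∈ l ∨ c ∈ acc := by
  intro fuel
  induction fuel with
  | zero =>
    intro l acc h
    rw [PySem.Chars.replace.go.eq_def] at h
    simp at h
    tauto
  | succ n ih =>
    intro l acc h
    match l with
    | [] =>
      rw [PySem.Chars.replace.go.eq_def] at h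
      simp at h; tauto
    | x :: t =>
      rw [PySem.Chars.replace.go.eq_def] at h
      simp at h
      split_ifs at h with hp
      · rcases ih _ _ h with h' | h'
        · exact Or.inl (List.mem_of_mem_drop h')
        · exact Or.inr (by simpa using h')
      · rcases ih _ _ h with h' | h'
        · exact Or.inl (List.mem_cons_of_mem _ h')
        · rcases List.mem_cons.mp h' with h'' | h''
          · exact Or.inl (by simp [h''])
          · tauto

theorem pv_replace_mem {c : Char} (l old : List Char) (hold : old ≠ [])
    (hc : c ∈ PySem.Chars.replace l old []) : c ∈ l := by
  unfold PySem.Chars.replace at hc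
  rw [if_neg (by simpa using hold)] at hc
  rcases pv_go_mem old _ _ _ hc with h | h
  · exact h
  · simp at h

-- … and replacing '.' by '' leaves no '.' at all (so A's lstrip('.') strips nothing)
theorem pv_go_no_dot : ∀ (fuel : Nat) (l acc : List Char), l.length ≤ fuel → '.' ∉ acc →
    '.' ∉ PySem.Chars.replace.go ['.'] [] fuel l acc := by
  intro fuel
  induction fuel with
  | zero =>
    intro l acc h hacc
    have : l = [] := List.eq_nil_of_length_eq_zero (Nat.le_zero.mp h)
    subst this
    rw [PySem.Chars.replace.go.eq_def]
    simpa using hacc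
  | succ n ih =>
    intro l acc h hacc
    match l with
    | [] =>
      rw [PySem.Chars.replace.go.eq_def]
      simpa using hacc
    | x :: t =>
      by_cases hp : ['.'].isPrefixOf (x :: t) = true
      · rw [PySem.Chars.replace.go.eq_def]
        simp only [hp, if_true]
        exact ih _ _ (by simp at h ⊢; omega) hacc
      · rw [PySem.Chars.replace.go.eq_def]
        simp only [hp, if_false, Bool.false_eq_true]
        have hx : x ≠ '.' := by
          intro hx; apply hp; simp [hx, List.isPrefixOf]
        exact ih _ _ (by simp at h ⊢; omega) (by simp [hacc]; exact fun hh => hx hh.symm)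

theorem pv_replace_no_dot (l : List Char) : '.' ∉ PySem.Chars.replace l ['.'] [] := by
  unfold PySem.Chars.replace
  rw [if_neg (by simp)]
  exact pv_go_no_dot _ _ _ le_rfl (by simp)

-- the two ports agree
theorem pv_main (rut : String) : formatear_rut rut = formatear_rut_alt rut := by
  unfold formatear_rut formatear_rut_alt
  set L := PySem.Chars.strip (PySem.Chars.replace
      (PySem.Chars.replace (PySem.Chars.upper rut.toList) ['.'] []) ['-'] []) with hLdef
  by_cases hlen : L.length < 2
  · simp only [if_pos hlen]
  · simp only [if_neg hlen]
    have hnd : '.' ∉ L := by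
      intro hmem
      apply pv_replace_no_dot (PySem.Chars.upper rut.toList)
      refine pv_replace_mem _ ['-'] (by simp) ?_
      rw [hLdef] at hmem
      unfold PySem.Chars.strip PySem.Chars.rstrip PySem.Chars.lstrip at hmem
      rw [List.mem_reverse] at hmem
      have h2 := (List.dropWhile_sublist _).mem hmem
      rw [List.mem_reverse] at h2
      exact (List.dropWhile_sublist _).mem h2
    set cuerpo := PySem.List.slice L none (some (-1)) with hcdef
    have hcue : cuerpo = L.take (L.length - 1) := pv_slice_to1 L
    have hcne : cuerpo ≠ [] := by
      rw [hcue]; intro hnil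
      have := congrArg List.length hnil
      simp at this; omega
    have hrne : cuerpo.reverse ≠ [] := by simpa using hcne
    have hA := pv_aloop_eq_groups_aux cuerpo.length cuerpo le_rfl hcne
    have hB := pv_bloop_eq_groups_aux cuerpo.reverse.length cuerpo.reverse 0 le_rfl (by norm_num)
    rw [if_pos (Or.inl rfl)] at hB
    rw [List.nil_append] at hB
    obtain ⟨ch, hch, hchmem⟩ := pv_groups_getLast_aux cuerpo.reverse.length cuerpo.reverse le_rfl hrne
    have hch_ne : (ch == '.') = false := by
      rw [beq_eq_false_iff_ne]
      intro hh; subst hh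
      exact hnd (List.mem_of_mem_take (hcue ▸ (List.mem_reverse.mp hchmem)))
    rw [hA, hB, pv_slice_to1]
    have hXlen : ((pvGroups cuerpo.reverse).reverse ++ ['.']).length - 1
        = (pvGroups cuerpo.reverse).reverse.length := by simp
    rw [hXlen, List.take_left]
    refine congrArg String.mk ?_
    have hXhead : (pvGroups cuerpo.reverse).reverse.head? = some ch := by
      rw [List.head?_reverse]; exact hch
    match hX : (pvGroups cuerpo.reverse).reverse with
    | [] => rw [hX] at hXhead; simp at hXhead
    | a :: t =>
      rw [hX] at hXhead
      simp at hXhead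
      subst hXhead
      simp [hch_ne]

-- ===== VERDICT (by name: the statement is the Claim_ definition above) =====
theorem formatear_rut_spec : Claim_equal_formatear_rut := by
  intro rut _
  unfold Spec_formatear_rut
  exact pv_main rut
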